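-- pv_equiv track=rewrite | github.com/barneyh89/hello-world-python | dice.py | return_dice_as_text
-- ===== SOURCE A (Python) =====
-- def return_dice_as_text(dice):
--     output = ""
--     for i in range(len(dice)):
--         if i == 0:
--             output += f"a {dice[i]}"
--             if len(dice) == 1:
--                 break
--         elif i == len(dice) - 1:
--             output += f" and a {dice[i]}; totaling {sum(dice)}"
--         else:
--             output += f", a {dice[i]}"
--     return output
-- ===== SOURCE B (Python) =====
-- def return_dice_as_text(dice):
--     if not dice:
--         return ""
--     head = f"a {dice[0]}"
--     if len(dice) == 1:
--         return head
--     middle = "".join(f", a {d}" for d in dice[1:-1])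
--     tail = f" and a {dice[-1]}; totaling {sum(dice)}"
--     return head + middle + tail
-- ===== Notes on version B (the rewrite author's own statement) =====
-- stated objective: idiomatic
-- what changed: Replaced the index loop with positional if/elif/else branches by a head/middle/tail segment decomposition: slice dice[1:-1] mapped through join plus explicit head and tail pieces.
import Mathlib
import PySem

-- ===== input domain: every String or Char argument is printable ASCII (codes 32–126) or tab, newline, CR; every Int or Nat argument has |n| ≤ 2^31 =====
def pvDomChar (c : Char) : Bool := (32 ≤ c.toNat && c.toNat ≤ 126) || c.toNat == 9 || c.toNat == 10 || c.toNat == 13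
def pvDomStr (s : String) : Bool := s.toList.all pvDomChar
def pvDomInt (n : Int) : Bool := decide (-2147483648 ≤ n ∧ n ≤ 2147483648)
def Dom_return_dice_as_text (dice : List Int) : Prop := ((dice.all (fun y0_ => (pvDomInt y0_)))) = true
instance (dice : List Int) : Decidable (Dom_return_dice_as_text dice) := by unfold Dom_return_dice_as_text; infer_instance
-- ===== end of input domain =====

-- B replaces A's positional if/elif/else index loop by a head/middle/tail segment decomposition
-- (slice dice[1:-1] mapped and joined); objective: more idiomatic, same cost.

-- ===== PORT A =====
-- the for-loop over range(len(dice)); the `break` is transliterated as an early return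
def return_dice_as_text_loop (dice : List Int) (idxs : List Int) (output : String) : String :=
  match idxs with
  | [] => output
  | i :: rest =>
    if i = 0 then
      let output := output ++ ("a " ++ PySem.Int.toStr (PySem.List.pyGetD dice i 0))
      if dice.length = 1 then output
      else return_dice_as_text_loop dice rest output
    else if i = (dice.length : Int) - 1 then
      return_dice_as_text_loop dice rest
        (output ++ (" and a " ++ PySem.Int.toStr (PySem.List.pyGetD dice i 0) ++ "; totaling " ++ PySem.Int.toStr dice.sum))
    else
      return_dice_as_text_loop dice rest (output ++ (", a " ++ PySem.Int.toStr (PySem.List.pyGetD dice i 0)))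

def return_dice_as_text (dice : List Int) : String :=
  return_dice_as_text_loop dice (PySem.List.pyRange 0 dice.length 1) ""

-- ===== PORT B =====
def return_dice_as_text_alt (dice : List Int) : String :=
  match dice with
  | [] => ""
  | d0 :: _ =>
    let head := "a " ++ PySem.Int.toStr d0
    if dice.length = 1 then head
    else
      let middle := PySem.Str.join ""
        ((PySem.List.slice dice (some 1) (some (-1))).map (fun d => ", a " ++ PySem.Int.toStr d))
      let tail := " and a " ++ PySem.Int.toStr (PySem.List.pyGetD dice (-1) 0)
        ++ "; totaling " ++ PySem.Int.toStr dice.sum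
      head ++ middle ++ tail

-- ===== PRECONDITION & SPEC =====
def Spec_return_dice_as_text (dice : List Int) (out : String) : Prop := out = return_dice_as_text_alt dice
instance (dice : List Int) (out : String) : Decidable (Spec_return_dice_as_text dice out) := by unfold Spec_return_dice_as_text; infer_instance

-- ===== CLAIM (what is proved, stated in full; the proofs are below) =====
def Claim_equal_return_dice_as_text : Prop := ∀ (dice : List Int), Dom_return_dice_as_text dice → Spec_return_dice_as_text dice (return_dice_as_text dice)

-- ===== LEMMAS AND PROOFS =====

lemma chars_join_nil_cons (c : List Char) (cs : List (List Char)) :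
    PySem.Chars.join [] (c :: cs) = c ++ PySem.Chars.join [] cs := by
  cases cs with
  | nil => simp [PySem.Chars.join, List.intercalate]
  | cons y ys => rw [PySem.Chars.join_cons_cons]; simp

lemma str_join_nil_cons (x : String) (xs : List String) :
    PySem.Str.join "" (x :: xs) = x ++ PySem.Str.join "" xs := by
  rw [← String.toList_inj]
  simp [PySem.Str.toList_join, chars_join_nil_cons]

lemma getD_of_drop_head {dice : List Int} {k : Nat} {m : Int} {rest : List Int}
    (h : dice.drop k = m :: rest) : dice.getD k 0 = m := by
  have h0 : (dice.drop k)[0]? = some m := by simp [h]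
  rw [List.getElem?_drop] at h0
  simp at h0
  simp [List.getD, h0]

-- A's loop over the remaining indices k, k+1, …, n-1 (1 ≤ k) produces the middle parts and the tail.
lemma loop_middle : ∀ (mid : List Int) (k : Nat) (dice : List Int) (last : Int) (acc : String),
    1 ≤ k → dice.drop k = mid ++ [last] →
    return_dice_as_text_loop dice (PySem.List.pyRange (k : Int) (dice.length : Int) 1) acc
      = acc ++ PySem.Str.join "" (mid.map (fun d => ", a " ++ PySem.Int.toStr d))
        ++ (" and a " ++ PySem.Int.toStr last ++ "; totaling " ++ PySem.Int.toStr dice.sum) := by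
  intro mid
  induction mid with
  | nil =>
    intro k dice last acc hk hdrop
    have hlen : dice.length = k + 1 := by
      have := congrArg List.length hdrop
      simp [List.length_drop] at this
      omega
    have hklt : (k : Int) < (dice.length : Int) := by push_cast [hlen]; omega
    rw [PySem.List.pyRange_one_cons hklt]
    have hne0 : (k : Int) ≠ 0 := by exact_mod_cast Nat.one_le_iff_ne_zero.mp hk
    have hlast : (k : Int) = (dice.length : Int) - 1 := by push_cast [hlen]; omega
    have hget : PySem.List.pyGetD dice (k : Int) 0 = last := by
      rw [PySem.List.pyGetD_natCast]; exact getD_of_drop_head hdrop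
    have hnil : PySem.List.pyRange ((k : Int) + 1) (dice.length : Int) 1 = [] := by
      apply PySem.List.pyRange_one_eq_nil; push_cast [hlen]; omega
    simp only [return_dice_as_text_loop, if_neg hne0, if_pos hlast, hget, hnil]
    simp [PySem.Str.join, PySem.Chars.join, List.intercalate, String.append_assoc]
  | cons m ms ih =>
    intro k dice last acc hk hdrop
    have hlen : dice.length = k + ms.length + 2 := by
      have := congrArg List.length hdrop
      simp [List.length_drop] at this
      omega
    have hklt : (k : Int) < (dice.length : Int) := by push_cast [hlen]; omega
    rw [PySem.List.pyRange_one_cons hklt]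
    have hne0 : (k : Int) ≠ 0 := by exact_mod_cast Nat.one_le_iff_ne_zero.mp hk
    have hnelast : (k : Int) ≠ (dice.length : Int) - 1 := by push_cast [hlen]; omega
    have hget : PySem.List.pyGetD dice (k : Int) 0 = m := by
      rw [PySem.List.pyGetD_natCast]; exact getD_of_drop_head hdrop
    have hdrop' : dice.drop (k + 1) = ms ++ [last] := by
      have : dice.drop (k+1) = (dice.drop k).drop 1 := by rw [List.drop_drop]
      rw [this, hdrop]; simp
    have ihx := ih (k+1) dice last (acc ++ (", a " ++ PySem.Int.toStr m)) (by omega) hdrop'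
    simp only [return_dice_as_text_loop, if_neg hne0, if_neg hnelast, hget]
    push_cast at ihx
    rw [ihx]
    simp [str_join_nil_cons, String.append_assoc]

-- ===== VERDICT (by name: the statement is the Claim_ definition above) =====
theorem return_dice_as_text_spec : Claim_equal_return_dice_as_text := by
  intro dice _
  unfold Spec_return_dice_as_text return_dice_as_text return_dice_as_text_alt
  cases dice with
  | nil => simp [PySem.List.pyRange_one_eq_nil, return_dice_as_text_loop]
  | cons d0 rest =>
    rcases rest.eq_nil_or_concat with hrest | ⟨mid, last, hrest⟩
    · subst hrest
      have h1 : PySem.List.pyRange 0 (1 : Int) 1 = [0] := by decide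
      simp [h1, return_dice_as_text_loop, PySem.List.pyGetD_zero_cons]
    · rw [List.concat_eq_append] at hrest
      subst hrest
      have hlen : (d0 :: (mid ++ [last])).length = mid.length + 2 := by simp
      have hne1 : ¬ (d0 :: (mid ++ [last])).length = 1 := by simp [hlen]
      have hsplit : PySem.List.pyRange 0 ((d0 :: (mid ++ [last])).length : Int) 1
          = 0 :: PySem.List.pyRange 1 ((d0 :: (mid ++ [last])).length : Int) 1 := by
        rw [PySem.List.pyRange_one_cons (by push_cast [hlen]; omega)]
        norm_num
      rw [hsplit]
      have hget0 : PySem.List.pyGetD (d0 :: (mid ++ [last])) (0 : Int) 0 = d0 :=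
        PySem.List.pyGetD_zero_cons _ _ _
      have hdrop1 : (d0 :: (mid ++ [last])).drop 1 = mid ++ [last] := by simp
      have hloop := loop_middle mid 1 (d0 :: (mid ++ [last])) last
        ("" ++ ("a " ++ PySem.Int.toStr d0)) (by omega) hdrop1
      push_cast at hloop
      simp only [return_dice_as_text_loop, if_neg hne1, hget0]
      rw [hloop]
      have hslice : PySem.List.slice (d0 :: (mid ++ [last])) (some 1) (some (-1)) = mid := by
        simp [PySem.List.slice]
      have hgetlast : PySem.List.pyGetD (d0 :: (mid ++ [last])) (-1) 0 = last := by
        have hsh : d0 :: (mid ++ [last]) = (d0 :: mid) ++ [last] := by simp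
        rw [hsh, PySem.List.pyGetD_neg_one_append_singleton]
      rw [hslice, hgetlast]
      simp [String.append_assoc, String.empty_append]
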